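-- pv_equiv track=rewrite | github.com/w-hc/fabric | fabric/deploy/sow.py | join_parts_into_path
-- ===== SOURCE A (Python) =====
-- def join_parts_into_path(parts, nest_at):
--     if nest_at is None:
--         return '_'.join(parts)
--     else:
--         assert isinstance(nest_at, int) and nest_at >= 0
--         nest_at += 1  # skip the initial lead name
--         path = ""
--         for i, e in enumerate(parts):
--             if i == nest_at:
--                 path += f"{e}/"
--             else:
--                 path += f"{e}_"
--         path = path[:-1]  # remove the tail _ or /
--         return path
-- ===== SOURCE B (Python) =====
-- def join_parts_into_path(parts, nest_at):
--     if nest_at is None: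
--         return '_'.join(parts)
--     assert isinstance(nest_at, int) and nest_at >= 0
--     k = nest_at + 1  # skip the initial lead name
--     if k + 1 < len(parts):  # only then does A's slash survive the final strip
--         return '_'.join(parts[:k + 1]) + '/' + '_'.join(parts[k + 1:])
--     return '_'.join(parts)
-- ===== Notes on version B (the rewrite author's own statement) =====
-- stated objective: simpler
-- what changed: Replaces the enumerate-accumulate loop that appends a separator after every element and then strips the trailing character with two slice joins ('_'.join(left) + '/' + '_'.join(right) when the slash survives, plain '_'.join(parts) otherwise); str.join also avoids the loop's quadratic string concatenation.
import Mathlib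
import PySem

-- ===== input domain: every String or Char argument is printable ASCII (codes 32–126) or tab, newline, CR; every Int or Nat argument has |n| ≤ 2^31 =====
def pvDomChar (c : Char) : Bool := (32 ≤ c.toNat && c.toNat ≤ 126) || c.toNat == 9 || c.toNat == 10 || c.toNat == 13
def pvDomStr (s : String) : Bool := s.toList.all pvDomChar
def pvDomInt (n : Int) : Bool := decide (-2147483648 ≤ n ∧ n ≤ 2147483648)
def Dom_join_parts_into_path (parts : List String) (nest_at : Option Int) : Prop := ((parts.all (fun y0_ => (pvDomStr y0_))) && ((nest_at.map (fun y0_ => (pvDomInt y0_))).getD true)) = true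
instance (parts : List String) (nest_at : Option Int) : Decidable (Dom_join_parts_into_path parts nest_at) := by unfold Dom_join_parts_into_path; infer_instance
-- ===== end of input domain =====

-- B replaces A's enumerate-accumulate loop (separator after every element, then strip
-- the trailing character) with two slice joins; objective: simpler.


-- ===== PORT A =====
def join_parts_into_path (parts : List String) (nest_at : Option Int) : String :=
  match nest_at with
  | none => PySem.Str.join "_" parts
  | some n =>
      -- assert nest_at >= 0 (Pre_); nest_at += 1
      let k := n + 1
      let path := (PySem.List.enumerate parts).foldl
        (fun path ie => if ie.1 = k then path ++ ie.2 ++ "/" else path ++ ie.2 ++ "_") ""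
      PySem.Str.slice path none (some (-1))   -- path[:-1]

-- ===== PORT B =====
def join_parts_into_path_alt (parts : List String) (nest_at : Option Int) : String :=
  match nest_at with
  | none => PySem.Str.join "_" parts
  | some n =>
      let k := n + 1
      if k + 1 < (parts.length : Int) then
        PySem.Str.join "_" (PySem.List.slice parts none (some (k + 1))) ++ "/" ++
          PySem.Str.join "_" (PySem.List.slice parts (some (k + 1)) none)
      else
        PySem.Str.join "_" parts

-- ===== PRECONDITION & SPEC =====
-- Pre_ excludes only nest_at = some n with n < 0, where A's assert raises AssertionError.
def Pre_join_parts_into_path (parts : List String) (nest_at : Option Int) : Prop :=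
  0 ≤ nest_at.getD 0
instance (parts : List String) (nest_at : Option Int) : Decidable (Pre_join_parts_into_path parts nest_at) := by unfold Pre_join_parts_into_path; infer_instance
def pvWitness_join_parts_into_path : List String × Option Int := (["a", "b", "c"], some 0)

def Spec_join_parts_into_path (parts : List String) (nest_at : Option Int) (out : String) : Prop := out = join_parts_into_path_alt parts nest_at
instance (parts : List String) (nest_at : Option Int) (out : String) : Decidable (Spec_join_parts_into_path parts nest_at out) := by unfold Spec_join_parts_into_path; infer_instance

-- ===== CLAIM (what is proved, stated in full; the proofs are below) =====
def Claim_equal_join_parts_into_path : Prop := ∀ (parts : List String) (nest_at : Option Int), Dom_join_parts_into_path parts nest_at → Pre_join_parts_into_path parts nest_at → Spec_join_parts_into_path parts nest_at (join_parts_into_path parts nest_at)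


-- ===== LEMMAS AND PROOFS =====

-- characters A's loop appends for the suffix of parts whose first element has, relative
-- to the nest position, offset m (m = 0 means "this element gets the slash")
def pvS (m : Int) : List String → List Char
  | [] => []
  | x :: xs => x.toList ++ (if m = 0 then ['/'] else ['_']) ++ pvS (m - 1) xs

-- every element followed by '_'
def pvJ (ps : List String) : List Char := (ps.map (fun x => x.toList ++ ['_'])).flatten

theorem pvJ_ne_nil (ps : List String) (h : ps ≠ []) : pvJ ps ≠ [] := by
  cases ps with
  | nil => exact absurd rfl h
  | cons x xs => simp [pvJ]

theorem pvS_ne_nil (m : Int) (ps : List String) (h : ps ≠ []) : pvS m ps ≠ [] := by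
  cases ps with
  | nil => exact absurd rfl h
  | cons x xs => by_cases hm : m = 0 <;> simp [pvS, hm]

theorem pvS_neg (m : Int) (ps : List String) (h : m < 0) : pvS m ps = pvJ ps := by
  induction ps generalizing m with
  | nil => simp [pvS, pvJ]
  | cons x xs ih =>
      have hm : ¬ m = 0 := by omega
      simp [pvS, pvJ, hm, ih (m - 1) (by omega)]

theorem pvS_ge (m : Int) (ps : List String) (h : (ps.length : Int) ≤ m) : pvS m ps = pvJ ps := by
  induction ps generalizing m with
  | nil => simp [pvS, pvJ]
  | cons x xs ih =>
      have hm : ¬ m = 0 := by simp at h; omega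
      have : (xs.length : Int) ≤ m - 1 := by simp at h; omega
      simp [pvS, pvJ, hm, ih (m - 1) this]

theorem pvJoin_eq (ps : List String) :
    (PySem.Str.join "_" ps).toList = (pvJ ps).dropLast := by
  induction ps with
  | nil => simp [pvJ, PySem.Chars.join_nil]
  | cons x xs ih =>
      cases xs with
      | nil => simp [pvJ, PySem.Chars.join_singleton]
      | cons y ys =>
          have hne : pvJ (y :: ys) ≠ [] := pvJ_ne_nil _ (by simp)
          have hx : pvJ (x :: y :: ys) = (x.toList ++ ['_']) ++ pvJ (y :: ys) := by
            simp [pvJ]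
          simp only [PySem.Str.toList_join, List.map_cons] at ih ⊢
          rw [PySem.Chars.join_cons_cons, hx, List.dropLast_append_of_ne_nil hne, ← ih]
          simp

theorem pvFold_eq (k : Int) (ps : List String) : ∀ (s : Int) (acc : String),
    ((PySem.List.enumerate ps s).foldl
      (fun path ie => if ie.1 = k then path ++ ie.2 ++ "/" else path ++ ie.2 ++ "_") acc).toList
      = acc.toList ++ pvS (k - s) ps := by
  induction ps with
  | nil => intro s acc; simp [PySem.List.enumerate_nil, pvS]
  | cons x xs ih =>
      intro s acc
      rw [PySem.List.enumerate_cons]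
      simp only [List.foldl_cons]
      by_cases h : s = k
      · have hif : (if ((s : Int), x).1 = k then acc ++ x ++ "/" else acc ++ x ++ "_")
            = acc ++ x ++ "/" := by simp [h]
        rw [hif, ih (s + 1)]
        simp [pvS, show k - s = 0 from by omega, show k - (s + 1) = -1 from by omega]
      · have hif : (if ((s : Int), x).1 = k then acc ++ x ++ "/" else acc ++ x ++ "_")
            = acc ++ x ++ "_" := by simp [h]
        rw [hif, ih (s + 1)]
        have hne : ¬ (k - s = 0) := by omega
        simp [pvS, hne, show k - (s + 1) = k - s - 1 from by omega]

theorem pvS_hit_last (m : Nat) (ps : List String) (h : m + 1 = ps.length) :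
    (pvS (m : Int) ps).dropLast = (pvJ ps).dropLast := by
  induction ps generalizing m with
  | nil => simp at h
  | cons x xs ih =>
      cases xs with
      | nil =>
          have : m = 0 := by simp at h; omega
          subst this
          simp [pvS, pvJ]
      | cons y ys =>
          have hm : ¬ m = 0 := by simp at h; omega
          have hrec : (m : Int) - 1 = ((m - 1 : Nat) : Int) := by omega
          have hlen : (m - 1) + 1 = (y :: ys).length := by simp at h ⊢; omega
          have hsne : pvS ((m - 1 : Nat) : Int) (y :: ys) ≠ [] := pvS_ne_nil _ _ (by simp)
          have hjne : pvJ (y :: ys) ≠ [] := pvJ_ne_nil _ (by simp)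
          calc (pvS (m : Int) (x :: y :: ys)).dropLast
              = ((x.toList ++ ['_']) ++ pvS ((m - 1 : Nat) : Int) (y :: ys)).dropLast := by
                simp [pvS, hm, hrec]
            _ = (x.toList ++ ['_']) ++ (pvS ((m - 1 : Nat) : Int) (y :: ys)).dropLast := by
                rw [List.dropLast_append_of_ne_nil hsne]
            _ = (x.toList ++ ['_']) ++ (pvJ (y :: ys)).dropLast := by rw [ih (m - 1) hlen]
            _ = (pvJ (x :: y :: ys)).dropLast := by
                rw [show pvJ (x :: y :: ys) = (x.toList ++ ['_']) ++ pvJ (y :: ys) from by simp [pvJ],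
                    List.dropLast_append_of_ne_nil hjne]

theorem pvS_hit_mid (m : Nat) (ps : List String) (h : m + 1 < ps.length) :
    (pvS (m : Int) ps).dropLast
      = (pvJ (ps.take (m + 1))).dropLast ++ ['/'] ++ (pvJ (ps.drop (m + 1))).dropLast := by
  induction ps generalizing m with
  | nil => simp at h
  | cons x xs ih =>
      cases m with
      | zero =>
          have hxs : xs ≠ [] := by
            simp at h; exact List.ne_nil_of_length_pos (by omega)
          have hjne : pvJ xs ≠ [] := pvJ_ne_nil _ hxs
          calc (pvS ((0 : Nat) : Int) (x :: xs)).dropLast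
              = ((x.toList ++ ['/']) ++ pvJ xs).dropLast := by
                simp [pvS, pvS_neg (-1) xs (by omega)]
            _ = (x.toList ++ ['/']) ++ (pvJ xs).dropLast := by
                rw [List.dropLast_append_of_ne_nil hjne]
            _ = (pvJ ((x :: xs).take 1)).dropLast ++ ['/'] ++ (pvJ ((x :: xs).drop 1)).dropLast := by
                simp [pvJ]
      | succ m' =>
          have hlen : m' + 1 < xs.length := by simp at h; omega
          have hrec : ((m' + 1 : Nat) : Int) - 1 = ((m' : Nat) : Int) := by omega
          have hxs : xs ≠ [] := List.ne_nil_of_length_pos (by omega)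
          have hsne : pvS ((m' : Nat) : Int) xs ≠ [] := pvS_ne_nil _ _ hxs
          have htne : pvJ (xs.take (m' + 1)) ≠ [] := by
            apply pvJ_ne_nil
            have : (xs.take (m' + 1)).length = m' + 1 := by rw [List.length_take]; omega
            exact List.ne_nil_of_length_pos (by omega)
          calc (pvS ((m' + 1 : Nat) : Int) (x :: xs)).dropLast
              = ((x.toList ++ ['_']) ++ pvS ((m' : Nat) : Int) xs).dropLast := by
                simp [pvS, show ¬((m' : Int) + 1 = 0) from by omega]
            _ = (x.toList ++ ['_']) ++ (pvS ((m' : Nat) : Int) xs).dropLast := by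
                rw [List.dropLast_append_of_ne_nil hsne]
            _ = (x.toList ++ ['_']) ++
                ((pvJ (xs.take (m' + 1))).dropLast ++ ['/'] ++ (pvJ (xs.drop (m' + 1))).dropLast) := by
                rw [ih m' hlen]
            _ = (pvJ ((x :: xs).take (m' + 1 + 1))).dropLast ++ ['/']
                  ++ (pvJ ((x :: xs).drop (m' + 1 + 1))).dropLast := by
                rw [show pvJ ((x :: xs).take (m' + 1 + 1))
                      = (x.toList ++ ['_']) ++ pvJ (xs.take (m' + 1)) from by simp [pvJ],
                    List.dropLast_append_of_ne_nil htne]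
                simp

-- ===== VERDICT (by name: the statement is the Claim_ definition above) =====
theorem join_parts_into_path_spec : Claim_equal_join_parts_into_path := by
  intro parts nest_at _dom pre
  unfold Spec_join_parts_into_path
  cases nest_at with
  | none => rfl
  | some n =>
      have hn : 0 ≤ n := pre
      have htl : (join_parts_into_path parts (some n)).toList
          = (join_parts_into_path_alt parts (some n)).toList → join_parts_into_path parts (some n)
          = join_parts_into_path_alt parts (some n) := fun h => String.toList_injective h
      apply htl
      set m : Nat := (n + 1).toNat with hm
      have hkm : n + 1 = (m : Int) := by omega
      have hA : (join_parts_into_path parts (some n)).toList = (pvS (m : Int) parts).dropLast := by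
        show (PySem.Str.slice _ none (some (-1))).toList = _
        rw [PySem.Str.slice_to_neg_one]
        rw [pvFold_eq (n + 1) parts 0 ""]
        simp [hkm]
      rw [hA]
      by_cases hc : n + 1 + 1 < (parts.length : Int)
      · have hmlen : m + 1 < parts.length := by omega
        have hB : (join_parts_into_path_alt parts (some n)).toList
            = (pvJ (parts.take (m + 1))).dropLast ++ ['/'] ++ (pvJ (parts.drop (m + 1))).dropLast := by
          simp only [join_parts_into_path_alt]
          rw [if_pos hc]
          have h1 : PySem.List.slice parts none (some (n + 1 + 1)) = parts.take (m + 1) := by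
            rw [PySem.List.slice_to _ (by omega)]
            congr 1; omega
          have h2 : PySem.List.slice parts (some (n + 1 + 1)) none = parts.drop (m + 1) := by
            rw [PySem.List.slice_from _ (by omega)]
            congr 1; omega
          simp only [h1, h2, String.toList_append, pvJoin_eq]
          simp
        rw [hB, pvS_hit_mid m parts hmlen]
      · have hB : (join_parts_into_path_alt parts (some n)).toList = (pvJ parts).dropLast := by
          simp only [join_parts_into_path_alt]
          rw [if_neg hc, pvJoin_eq]
        rw [hB]
        by_cases hl : (parts.length : Int) ≤ n + 1
        · rw [pvS_ge (m : Int) parts (by omega)]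
        · have : m + 1 = parts.length := by omega
          exact pvS_hit_last m parts this
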